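-- pv_equiv track=rewrite | github.com/zakiabashir/hackhaton0_personal_ai_employe | watchers/gmail_watcher.py | _suggest_actions
-- ===== SOURCE A (Python) =====
-- def _suggest_actions(message: dict) -> list:
--     """Suggest actions based on email content"""
--     actions = []
--     subject = message.get('subject', '').lower()
--     snippet = message.get('snippet', '').lower()
--
--     # Common actions
--     actions.append('- [ ] Read and analyze email content')
--
--     # Context-specific actions
--     if any(kw in subject + snippet for kw in ['invoice', 'payment']):
--         actions.append('- [ ] Check invoice details')
--         actions.append('- [ ] Verify payment amount')
--         actions.append('- [ ] Draft payment approval if needed')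
--
--     elif any(kw in subject + snippet for kw in ['meeting', 'schedule', 'calendar']):
--         actions.append('- [ ] Check calendar availability')
--         actions.append('- [ ] Propose meeting times')
--         actions.append('- [ ] Add to calendar if approved')
--
--     elif any(kw in subject + snippet for kw in ['proposal', 'contract', 'agreement']):
--         actions.append('- [ ] Review terms and conditions')
--         actions.append('- [ ] Identify key clauses')
--         actions.append('- [ ] Flag concerns for review')
--
--     elif any(kw in subject + snippet for kw in ['question', 'help', 'support']):
--         actions.append('- [ ] Draft helpful response')
--         actions.append('- [ ] Get approval before sending')
--
--     actions.append('- [ ] Archive after processing')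
--
--     return actions
-- ===== SOURCE B (Python) =====
-- # B: flat keyword->category-index map; the matched category is min() over the
-- # indices of all keywords found in the text (priority = original elif order),
-- # instead of A's ordered if/elif cascade with first-match short-circuit.
-- _KW2CAT = {
--     'invoice': 0, 'payment': 0,
--     'meeting': 1, 'schedule': 1, 'calendar': 1,
--     'proposal': 2, 'contract': 2, 'agreement': 2,
--     'question': 3, 'help': 3, 'support': 3,
-- }
-- _CAT_ACTIONS = [
--     ['- [ ] Check invoice details',
--      '- [ ] Verify payment amount',
--      '- [ ] Draft payment approval if needed'],
--     ['- [ ] Check calendar availability',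
--      '- [ ] Propose meeting times',
--      '- [ ] Add to calendar if approved'],
--     ['- [ ] Review terms and conditions',
--      '- [ ] Identify key clauses',
--      '- [ ] Flag concerns for review'],
--     ['- [ ] Draft helpful response',
--      '- [ ] Get approval before sending'],
-- ]
--
-- def _suggest_actions(message: dict) -> list:
--     text = (message.get('subject', '') + message.get('snippet', '')).lower()
--     hits = [cat for kw, cat in _KW2CAT.items() if kw in text]
--     body = _CAT_ACTIONS[min(hits)] if hits else []
--     return (['- [ ] Read and analyze email content']
--             + body
--             + ['- [ ] Archive after processing'])
-- ===== Notes on version B (the rewrite author's own statement) =====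
-- stated objective: alternative
-- what changed: Replaced the if/elif cascade with a flat keyword-to-category-index map: collect the indices of all keywords present in the text and take min() as the winning category (priority = original branch order), then splice that category's actions between the fixed pre/post actions.
import Mathlib
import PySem

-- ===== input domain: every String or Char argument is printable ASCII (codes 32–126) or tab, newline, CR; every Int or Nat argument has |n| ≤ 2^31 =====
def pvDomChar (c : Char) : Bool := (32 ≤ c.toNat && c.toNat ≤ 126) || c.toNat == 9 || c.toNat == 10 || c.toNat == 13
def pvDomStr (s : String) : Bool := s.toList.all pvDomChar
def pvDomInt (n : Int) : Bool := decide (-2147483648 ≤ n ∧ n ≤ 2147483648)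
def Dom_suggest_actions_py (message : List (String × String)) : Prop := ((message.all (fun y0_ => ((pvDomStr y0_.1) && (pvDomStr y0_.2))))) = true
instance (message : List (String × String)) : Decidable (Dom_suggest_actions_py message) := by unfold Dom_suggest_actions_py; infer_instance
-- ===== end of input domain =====

-- B replaces A's if/elif cascade by a flat keyword→category-index map whose minimum matched index picks the action block (objective: alternative).

-- ===== PORT A =====
def suggest_actions_py (message : List (String × String)) : List String :=
  let actions : List String := []
  let subject := PySem.Str.lower ((PySem.Dict.mk message).getD "subject" "")
  let snippet := PySem.Str.lower ((PySem.Dict.mk message).getD "snippet" "")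
  let actions := actions ++ ["- [ ] Read and analyze email content"]
  let actions :=
    if ["invoice", "payment"].any (fun kw => PySem.Str.isIn kw (subject ++ snippet)) then
      actions ++ ["- [ ] Check invoice details", "- [ ] Verify payment amount",
                  "- [ ] Draft payment approval if needed"]
    else if ["meeting", "schedule", "calendar"].any (fun kw => PySem.Str.isIn kw (subject ++ snippet)) then
      actions ++ ["- [ ] Check calendar availability", "- [ ] Propose meeting times",
                  "- [ ] Add to calendar if approved"]
    else if ["proposal", "contract", "agreement"].any (fun kw => PySem.Str.isIn kw (subject ++ snippet)) then
      actions ++ ["- [ ] Review terms and conditions", "- [ ] Identify key clauses",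
                  "- [ ] Flag concerns for review"]
    else if ["question", "help", "support"].any (fun kw => PySem.Str.isIn kw (subject ++ snippet)) then
      actions ++ ["- [ ] Draft helpful response", "- [ ] Get approval before sending"]
    else actions
  actions ++ ["- [ ] Archive after processing"]

-- ===== PORT B =====
-- flat keyword → category-index map (_KW2CAT of Source B, in insertion order)
def pvKw2Cat : List (String × Nat) :=
  [("invoice", 0), ("payment", 0),
   ("meeting", 1), ("schedule", 1), ("calendar", 1),
   ("proposal", 2), ("contract", 2), ("agreement", 2),
   ("question", 3), ("help", 3), ("support", 3)]

-- _CAT_ACTIONS of Source B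
def pvCatActions : List (List String) :=
  [ ["- [ ] Check invoice details", "- [ ] Verify payment amount",
     "- [ ] Draft payment approval if needed"],
    ["- [ ] Check calendar availability", "- [ ] Propose meeting times",
     "- [ ] Add to calendar if approved"],
    ["- [ ] Review terms and conditions", "- [ ] Identify key clauses",
     "- [ ] Flag concerns for review"],
    ["- [ ] Draft helpful response", "- [ ] Get approval before sending"] ]

def suggest_actions_py_alt (message : List (String × String)) : List String :=
  let text := PySem.Str.lower ((PySem.Dict.mk message).getD "subject" "" ++
                               (PySem.Dict.mk message).getD "snippet" "")
  let hits := (pvKw2Cat.filter (fun p => PySem.Str.isIn p.1 text)).map Prod.snd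
  let body := match hits.min? with
              | none => []
              | some c => pvCatActions.getD c []
  ["- [ ] Read and analyze email content"] ++ body ++ ["- [ ] Archive after processing"]

-- ===== PRECONDITION & SPEC =====
def Spec_suggest_actions_py (message : List (String × String)) (out : List String) : Prop := out = suggest_actions_py_alt message
instance (message : List (String × String)) (out : List String) : Decidable (Spec_suggest_actions_py message out) := by unfold Spec_suggest_actions_py; infer_instance

-- ===== CLAIM (what is proved, stated in full; the proofs are below) =====
def Claim_equal_suggest_actions_py : Prop := ∀ (message : List (String × String)), Dom_suggest_actions_py message → Spec_suggest_actions_py message (suggest_actions_py message)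

-- ===== LEMMAS AND PROOFS =====

-- lower distributes over concatenation (lowering is character-wise)
theorem pv_lower_append (a b : String) :
    PySem.Str.lower (a ++ b) = PySem.Str.lower a ++ PySem.Str.lower b := by
  apply String.toList_injective
  simp [PySem.Str.toList_lower, PySem.Chars.lower]

-- A's body with 'kw in text' abstracted to f kw
def pvAExp (f : String -> Bool) : List String :=
  let actions : List String := []
  let actions := actions ++ ["- [ ] Read and analyze email content"]
  let actions :=
    if ["invoice", "payment"].any f then
      actions ++ ["- [ ] Check invoice details", "- [ ] Verify payment amount",
                  "- [ ] Draft payment approval if needed"]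
    else if ["meeting", "schedule", "calendar"].any f then
      actions ++ ["- [ ] Check calendar availability", "- [ ] Propose meeting times",
                  "- [ ] Add to calendar if approved"]
    else if ["proposal", "contract", "agreement"].any f then
      actions ++ ["- [ ] Review terms and conditions", "- [ ] Identify key clauses",
                  "- [ ] Flag concerns for review"]
    else if ["question", "help", "support"].any f then
      actions ++ ["- [ ] Draft helpful response", "- [ ] Get approval before sending"]
    else actions
  actions ++ ["- [ ] Archive after processing"]

-- B's body with 'kw in text' abstracted to f kw
def pvBExp (f : String -> Bool) : List String :=
  let hits := (pvKw2Cat.filter (fun p => f p.1)).map Prod.snd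
  let body := match hits.min? with
              | none => []
              | some c => pvCatActions.getD c []
  ["- [ ] Read and analyze email content"] ++ body ++ ["- [ ] Archive after processing"]

-- a table function taking prescribed values on the 11 keywords
def pvMk (b1 b2 b3 b4 b5 b6 b7 b8 b9 b10 b11 : Bool) : String -> Bool := fun kw =>
  if kw == "invoice" then b1 else if kw == "payment" then b2
  else if kw == "meeting" then b3 else if kw == "schedule" then b4
  else if kw == "calendar" then b5 else if kw == "proposal" then b6
  else if kw == "contract" then b7 else if kw == "agreement" then b8
  else if kw == "question" then b9 else if kw == "help" then b10
  else if kw == "support" then b11 else false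

set_option maxHeartbeats 4000000 in
theorem pv_key (b1 b2 b3 b4 b5 b6 b7 b8 b9 b10 b11 : Bool) :
    pvAExp (pvMk b1 b2 b3 b4 b5 b6 b7 b8 b9 b10 b11) =
    pvBExp (pvMk b1 b2 b3 b4 b5 b6 b7 b8 b9 b10 b11) := by
  revert b1 b2 b3 b4 b5 b6 b7 b8 b9 b10 b11
  decide

theorem pv_exp_eq (f : String -> Bool) : pvAExp f = pvBExp f :=
  pv_key (f "invoice") (f "payment") (f "meeting") (f "schedule") (f "calendar")
    (f "proposal") (f "contract") (f "agreement") (f "question") (f "help") (f "support")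

-- ===== VERDICT (by name: the statement is the Claim_ definition above) =====
theorem suggest_actions_py_spec : Claim_equal_suggest_actions_py := by
  intro message _
  unfold Spec_suggest_actions_py suggest_actions_py suggest_actions_py_alt
  rw [pv_lower_append]
  exact pv_exp_eq (fun kw => PySem.Str.isIn kw
    (PySem.Str.lower ((PySem.Dict.mk message).getD "subject" "") ++
     PySem.Str.lower ((PySem.Dict.mk message).getD "snippet" "")))
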